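-- pv_equiv track=rewrite | github.com/kkroy36/Final_project | new_method.py | parse_observations
-- ===== SOURCE A (Python) =====
-- def parse_observations(observations):
--     """makes trajectories from the observations"""
--     trajectories = []
--     trajectory = []
--     for observation in observations:
--         trajectory.append(observation)
--         if "None" in observation:
--             trajectories.append(trajectory)
--             trajectory = []
--     return trajectories
-- ===== SOURCE B (Python) =====
-- def parse_observations(observations):
--     """makes trajectories from the observations"""
--     obs = list(observations)
--     def go(xs):
--         for i, x in enumerate(xs):
--             if "None" in x:
--                 return [xs[:i + 1]] + go(xs[i + 1:])
--         return []
--     return go(obs)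
-- ===== Notes on version B (the rewrite author's own statement) =====
-- stated objective: alternative
-- what changed: Replaced the single accumulator loop (pending trajectory + growing result list) by a recursive decomposition: scan for the first marker, slice off that complete trajectory, and recurse on the remainder; the trailing incomplete trajectory is dropped because the recursion ends when no marker is found.
import Mathlib
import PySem

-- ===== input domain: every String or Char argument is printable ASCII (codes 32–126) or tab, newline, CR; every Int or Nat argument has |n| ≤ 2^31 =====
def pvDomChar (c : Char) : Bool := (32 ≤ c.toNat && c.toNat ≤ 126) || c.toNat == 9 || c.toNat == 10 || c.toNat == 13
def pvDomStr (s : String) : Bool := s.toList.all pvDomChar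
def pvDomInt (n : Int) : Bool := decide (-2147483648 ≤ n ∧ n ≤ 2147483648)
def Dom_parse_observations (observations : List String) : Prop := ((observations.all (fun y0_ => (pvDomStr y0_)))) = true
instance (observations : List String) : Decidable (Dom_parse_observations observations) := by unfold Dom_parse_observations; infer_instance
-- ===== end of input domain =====

-- B replaces A's accumulator loop by recursion that slices off the first complete
-- trajectory (up to and including the first "None" marker) and recurses on the rest;
-- objective: alternative decomposition, same work.

-- ===== PORT A =====
-- loop state: (trajectories, trajectory); each step appends o to trajectory and,
-- on a "None" marker, flushes the trajectory into trajectories.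
def parse_observations (observations : List String) : List (List String) :=
  (observations.foldl
    (fun st o =>
      let tr := st.2 ++ [o]
      if PySem.Str.isIn "None" o then (st.1 ++ [tr], ([] : List String)) else (st.1, tr))
    (([] : List (List String)), ([] : List String))).1

-- ===== PORT B =====
-- the for-loop scan of Source B's `go`: find the first marker; return the slice up to
-- and including it together with the remainder (none = no marker found).
def pvSplit : List String → Option (List String × List String)
  | [] => none
  | o :: rest =>
    if PySem.Str.isIn "None" o then some ([o], rest)
    else
      match pvSplit rest with
      | none => none
      | some (p, r) => some (o :: p, r)

-- termination fact for the recursion of `go` (cited by pvGo's decreasing_by)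
theorem pvSplit_len : ∀ {xs : List String} {p r : List String},
    pvSplit xs = some (p, r) → r.length < xs.length := by
  intro xs
  induction xs with
  | nil => intro p r h; simp [pvSplit] at h
  | cons o rest ih =>
    intro p r h
    simp only [pvSplit] at h
    split at h
    · cases h; simp
    · cases hrest : pvSplit rest with
      | none => rw [hrest] at h; cases h
      | some pr =>
        obtain ⟨p', r'⟩ := pr
        rw [hrest] at h
        cases h
        have := ih hrest
        simp only [List.length_cons]
        omega

def pvGo (xs : List String) : List (List String) :=
  match h : pvSplit xs with
  | none => []
  | some pr => pr.1 :: pvGo pr.2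
termination_by xs.length
decreasing_by exact pvSplit_len h

def parse_observations_alt (observations : List String) : List (List String) :=
  pvGo observations

-- ===== PRECONDITION & SPEC =====
def Spec_parse_observations (observations : List String) (out : List (List String)) : Prop := out = parse_observations_alt observations
instance (observations : List String) (out : List (List String)) : Decidable (Spec_parse_observations observations out) := by unfold Spec_parse_observations; infer_instance

-- ===== CLAIM (what is proved, stated in full; the proofs are below) =====
def Claim_equal_parse_observations : Prop := ∀ (observations : List String), Dom_parse_observations observations → Spec_parse_observations observations (parse_observations observations)

-- ===== LEMMAS AND PROOFS =====

-- A's loop body, named for the proofs (definitionally the lambda in parse_observations)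
def pvStepA (st : List (List String) × List String) (o : String) : List (List String) × List String :=
  if PySem.Str.isIn "None" o then (st.1 ++ [st.2 ++ [o]], ([] : List String)) else (st.1, st.2 ++ [o])

theorem parse_observations_eq_foldl (xs : List String) :
    parse_observations xs = (xs.foldl pvStepA ([], [])).1 := rfl

-- the produced-trajectories accumulator factors out of A's fold
theorem pvFoldA_acc : ∀ (xs : List String) (trs : List (List String)) (tr : List String),
    (xs.foldl pvStepA (trs, tr)).1 = trs ++ (xs.foldl pvStepA ([], tr)).1 := by
  intro xs
  induction xs with
  | nil => intro trs tr; simp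
  | cons o rest ih =>
    intro trs tr
    by_cases hm : PySem.Str.isIn "None" o = true
    · simp only [List.foldl_cons, pvStepA]
      simp only [if_pos hm, List.nil_append]
      rw [ih (trs ++ [tr ++ [o]]), ih [tr ++ [o]]]
      simp [List.append_assoc]
    · simp only [List.foldl_cons, pvStepA]
      simp only [if_neg hm]
      exact ih trs (tr ++ [o])

-- A's result as a structural recursion carrying the pending trajectory
def pvG (tr : List String) : List String → List (List String)
  | [] => []
  | o :: rest =>
    if PySem.Str.isIn "None" o then (tr ++ [o]) :: pvG [] rest else pvG (tr ++ [o]) rest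

theorem pvFoldA_eq_G : ∀ (xs : List String) (tr : List String),
    (xs.foldl pvStepA ([], tr)).1 = pvG tr xs := by
  intro xs
  induction xs with
  | nil => intro tr; simp [pvG]
  | cons o rest ih =>
    intro tr
    by_cases hm : PySem.Str.isIn "None" o = true
    · simp only [List.foldl_cons, pvStepA, pvG]
      simp only [if_pos hm, List.nil_append]
      rw [pvFoldA_acc rest [tr ++ [o]], ih []]
      simp
    · simp only [List.foldl_cons, pvStepA, pvG]
      simp only [if_neg hm]
      exact ih (tr ++ [o])

-- pvG in terms of B's split of the first trajectory
theorem pvG_split : ∀ (xs : List String) (tr : List String),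
    pvG tr xs = (match pvSplit xs with
                 | none => []
                 | some (p, r) => (tr ++ p) :: pvG [] r) := by
  intro xs
  induction xs with
  | nil => intro tr; simp [pvG, pvSplit]
  | cons o rest ih =>
    intro tr
    simp only [pvG, pvSplit]
    by_cases hm : PySem.Str.isIn "None" o = true
    · simp only [if_pos hm]
    · simp only [if_neg hm]
      rw [ih (tr ++ [o])]
      cases hrest : pvSplit rest with
      | none => rfl
      | some pr =>
        obtain ⟨p, r⟩ := pr
        simp [List.append_assoc]

theorem pvGo_eq_G (xs : List String) : pvGo xs = pvG [] xs := by
  rw [pvGo.eq_def]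
  split
  · next h => rw [pvG_split, h]
  · next pr h =>
    obtain ⟨p, r⟩ := pr
    rw [pvG_split, h]
    simp only [List.nil_append]
    exact congrArg _ (pvGo_eq_G r)
termination_by xs.length
decreasing_by exact pvSplit_len h

-- ===== VERDICT (by name: the statement is the Claim_ definition above) =====
theorem parse_observations_spec : Claim_equal_parse_observations := by
  intro xs _
  unfold Spec_parse_observations parse_observations_alt
  rw [parse_observations_eq_foldl, pvFoldA_eq_G, pvGo_eq_G]
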